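-- pv_equiv track=rewrite | github.com/MostlyKIGuess/DRing | src/services/arxiv_service.py | categorize_papers
-- ===== SOURCE A (Python) =====
-- from typing import List, Dict, Optional
--
-- def categorize_papers(papers: List[Dict]) -> Dict[str, List[Dict]]:
--     """Categorize papers by subject area"""
--     categories = {}
--
--     category_map = {
--         'cs': 'Computer Science',
--         'math': 'Mathematics',
--         'physics': 'Physics',
--         'q-bio': 'Quantitative Biology',
--         'q-fin': 'Quantitative Finance',
--         'stat': 'Statistics',
--         'eess': 'Electrical Engineering',
--         'econ': 'Economics',
--     }
--
--     for paper in papers: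
--         primary_cat = paper.get('primary_category', '').split('.')[0]
--         category_name = category_map.get(primary_cat, 'Other')
--
--         if category_name not in categories:
--             categories[category_name] = []
--         categories[category_name].append(paper)
--
--     return categories
-- ===== SOURCE B (Python) =====
-- def categorize_papers(papers):
--     """Categorize papers by subject area (partition by precomputed key)."""
--     category_map = {
--         'cs': 'Computer Science',
--         'math': 'Mathematics',
--         'physics': 'Physics',
--         'q-bio': 'Quantitative Biology',
--         'q-fin': 'Quantitative Finance',
--         'stat': 'Statistics',
--         'eess': 'Electrical Engineering',
--         'econ': 'Economics',
--     }
--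
--     def key(paper):
--         return category_map.get(paper.get('primary_category', '').split('.')[0], 'Other')
--
--     keyed = [(key(p), p) for p in papers]
--     names = list(dict.fromkeys(k for k, _ in keyed))
--     return {n: [p for k, p in keyed if k == n] for n in names}
-- ===== Notes on version B (the rewrite author's own statement) =====
-- stated objective: alternative
-- what changed: B precomputes each paper's category name once, collects the distinct names in first-appearance order with dict.fromkeys, and builds the result as {name: filtered sublist} by one filter pass per category, instead of A's single loop that grows per-category buckets inside a dict.
import Mathlib
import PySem

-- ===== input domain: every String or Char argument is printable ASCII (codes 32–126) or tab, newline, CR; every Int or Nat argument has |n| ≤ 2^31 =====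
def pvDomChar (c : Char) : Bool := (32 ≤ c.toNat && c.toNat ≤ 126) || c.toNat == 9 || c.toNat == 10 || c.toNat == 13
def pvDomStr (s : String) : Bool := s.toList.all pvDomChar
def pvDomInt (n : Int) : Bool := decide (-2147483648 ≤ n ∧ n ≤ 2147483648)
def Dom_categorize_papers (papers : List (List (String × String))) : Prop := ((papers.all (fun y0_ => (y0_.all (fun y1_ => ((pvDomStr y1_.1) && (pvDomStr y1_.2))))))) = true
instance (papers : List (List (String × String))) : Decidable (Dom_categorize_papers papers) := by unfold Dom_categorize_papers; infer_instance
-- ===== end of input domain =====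

-- B replaces A's incremental-bucket dict loop by a precomputed-key partition (first-appearance
-- names, then one filter per category name); objective: alternative, not faster.

-- the category_map dict literal, identical in both Python sources
def pvCatMap : PySem.Dict String String := PySem.Dict.ofList [("cs","Computer Science"),("math","Mathematics"),("physics","Physics"),("q-bio","Quantitative Biology"),("q-fin","Quantitative Finance"),("stat","Statistics"),("eess","Electrical Engineering"),("econ","Economics")]

-- ===== PORT A =====
-- loop body of A; paper.get uses first-match assoc lookup (List.lookup); split('.') always
-- returns a nonempty list, so the [0] index is total and ported exactly as pyGetD _ 0 ""
def stepA (categories : PySem.Dict String (List (List (String × String)))) (paper : List (String × String)) : PySem.Dict String (List (List (String × String))) :=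
  let primary_cat := PySem.List.pyGetD ((PySem.Str.split? ((paper.lookup "primary_category").getD "") ".").getD []) 0 ""
  let category_name := pvCatMap.getD primary_cat "Other"
  let c1 := if categories.contains category_name then categories else categories.insert category_name []
  c1.modify category_name [] (fun l => l ++ [paper])

def categorize_papers (papers : List (List (String × String))) : List (String × List (List (String × String))) :=
  (papers.foldl stepA PySem.Dict.empty).items

-- ===== PORT B =====
-- B's key(paper)
def keyB (paper : List (String × String)) : String :=
  pvCatMap.getD (PySem.List.pyGetD ((PySem.Str.split? ((paper.lookup "primary_category").getD "") ".").getD []) 0 "") "Other"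

def categorize_papers_alt (papers : List (List (String × String))) : List (String × List (List (String × String))) :=
  let keyed := papers.map (fun p => (keyB p, p))
  let names := PySem.List.dedup (keyed.map (·.1))
  names.map (fun n => (n, (keyed.filter (fun kp => kp.1 == n)).map (·.2)))

-- ===== PRECONDITION & SPEC =====
def Spec_categorize_papers (papers : List (List (String × String))) (out : List (String × List (List (String × String)))) : Prop := out = categorize_papers_alt papers
instance (papers : List (List (String × String))) (out : List (String × List (List (String × String)))) : Decidable (Spec_categorize_papers papers out) := by unfold Spec_categorize_papers; infer_instance

-- ===== CLAIM (what is proved, stated in full; the proofs are below) =====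
def Claim_equal_categorize_papers : Prop := ∀ (papers : List (List (String × String))), Dom_categorize_papers papers → Spec_categorize_papers papers (categorize_papers papers)

-- ===== LEMMAS AND PROOFS =====
-- A's 'ensure key, then append' equals a single modify with default []
theorem cond_modify (d : PySem.Dict String (List (List (String × String)))) (k : String)
    (f : List (List (String × String)) → List (List (String × String))) :
    (if d.contains k then d else d.insert k []).modify k [] f = d.modify k [] f := by
  by_cases h : d.contains k
  · simp [h]
  · have h' : d.contains k = false := by simpa using h
    simp only [h, Bool.false_eq_true, if_false]
    simp [PySem.Dict.modify, PySem.Dict.insert_insert_self, PySem.Dict.getD_insert_self, h',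
      PySem.Dict.getD_of_not_contains]

theorem step_eq (d : PySem.Dict String (List (List (String × String)))) (p : List (String × String)) :
    stepA d p = d.modify (keyB p) [] (fun l => l ++ [p]) := by
  unfold stepA keyB
  exact cond_modify d _ _

theorem main_eq (papers : List (List (String × String))) :
    categorize_papers papers = categorize_papers_alt papers := by
  unfold categorize_papers categorize_papers_alt
  have h1 : papers.foldl stepA PySem.Dict.empty
      = (papers.map (fun p => (keyB p, p))).foldl
          (fun d q => d.modify q.1 [] (fun l => l ++ [q.2])) PySem.Dict.empty := by
    rw [List.foldl_map]
    rw [funext₂ step_eq]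
  rw [h1]
  set keyed := papers.map (fun p => (keyB p, p)) with hk
  have hnd : ((keyed.foldl (fun d q => d.modify q.1 [] (fun l => l ++ [q.2])) PySem.Dict.empty)).keys.Nodup :=
    PySem.Dict.nodup_keys_foldl_modify_key keyed Prod.fst [] (fun d q => fun l => l ++ [q.2]) _ (by simp)
  rw [PySem.Dict.items_eq_map_keys _ hnd []]
  have hkeys : ((keyed.foldl (fun d q => d.modify q.1 [] (fun l => l ++ [q.2])) PySem.Dict.empty)).keys
      = PySem.List.dedup (keyed.map (·.1)) := by
    rw [PySem.Dict.keys_foldl_modify_key]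
    simp [PySem.Set.update, PySem.Set.ofList, PySem.List.dedup_eq_ofList]
  rw [hkeys]
  refine List.map_congr_left (fun n hn => ?_)
  congr 1
  rw [PySem.Dict.getD_foldl_modify_append]
  simp

-- ===== VERDICT (by name: the statement is the Claim_ definition above) =====
theorem categorize_papers_spec : Claim_equal_categorize_papers := by
  intro papers _
  unfold Spec_categorize_papers
  exact main_eq papers
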